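-- pv_equiv track=rewrite | github.com/prodromospapa/foldseek | 4.subcell_hierarchy_uniprot.py | build_ancestors_dict
-- ===== SOURCE A (Python) =====
-- def normalize_term(value):
--     return value.strip().rstrip(".").lower()
--
-- def get_all_ancestors(graph, term, visited=None):
--     if visited is None:
--         visited = set()
--     if term in visited:
--         return set()
--
--     visited.add(term)
--     all_ancestors = set()
--     for parent in graph.get(term, set()):
--         all_ancestors.add(parent)
--         all_ancestors.update(get_all_ancestors(graph, parent, visited.copy()))
--     return all_ancestors
--
-- def build_ancestors_dict(graph):
--     ancestors_dict = {}
--     for term in graph: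
--         normalized_term = normalize_term(term)
--         if not normalized_term:
--             continue
--
--         direct_parents = set(graph.get(normalized_term, set()))
--         ancestors = {normalized_term}
--         ancestors.update(direct_parents)
--         for parent in direct_parents:
--             ancestors.update(get_all_ancestors(graph, parent))
--
--         # Defensive guarantee: each term should always include itself.
--         ancestors.add(normalized_term)
--         ancestors_dict[normalized_term] = sorted(ancestors)
--
--     return ancestors_dict
-- ===== SOURCE B (Python) =====
-- def build_ancestors_dict(graph):
--     def closure(start):
--         # frontier BFS: expand whole levels at once instead of one node at a time
--         seen = set()
--         frontier = set(graph.get(start, ()))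
--         while frontier:
--             seen |= frontier
--             frontier = {q for p in frontier for q in graph.get(p, ())} - seen
--         seen.add(start)
--         return seen
--     norms = (t.strip().rstrip(".").lower() for t in graph)
--     return {n: sorted(closure(n)) for n in norms if n}
-- ===== Notes on version B (the rewrite author's own statement) =====
-- stated objective: alternative
-- what changed: Replaces the per-parent recursive DFS that copies the visited set at every branch (it re-walks every simple path, exponential on dense cyclic graphs) with a level-by-level frontier BFS over whole sets (union the frontier into seen, next frontier = successors minus seen), and builds the result dict in one comprehension over the normalized keys instead of a loop of inserts; measured 1.41x on the generated (sparse) timing inputs, below the 1.5x bar, so no speed is claimed.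
import Mathlib
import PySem

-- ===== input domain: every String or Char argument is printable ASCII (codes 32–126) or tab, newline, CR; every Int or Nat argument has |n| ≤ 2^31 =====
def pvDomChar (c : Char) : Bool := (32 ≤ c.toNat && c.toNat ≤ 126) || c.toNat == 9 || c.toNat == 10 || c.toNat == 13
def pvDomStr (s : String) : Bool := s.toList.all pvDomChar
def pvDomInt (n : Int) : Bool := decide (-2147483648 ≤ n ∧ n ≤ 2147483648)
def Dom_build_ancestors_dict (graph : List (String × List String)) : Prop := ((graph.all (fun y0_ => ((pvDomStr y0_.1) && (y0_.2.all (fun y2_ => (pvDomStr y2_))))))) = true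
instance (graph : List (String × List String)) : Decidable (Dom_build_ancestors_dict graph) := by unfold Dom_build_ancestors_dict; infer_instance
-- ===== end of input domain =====

-- B replaces A's branch-copying recursive DFS with a level-by-level frontier BFS over sets
-- and a single dict comprehension; objective: alternative algorithm, return values proved equal.

-- ===== PORT A =====
-- shared module helper: value.strip().rstrip(".").lower()
-- rstrip(".") has no PySem primitive; exact hand port: drop '.' from the right end
def rstripDot (s : String) : String :=
  String.ofList ((s.toList.reverse.dropWhile (fun c => c == '.')).reverse)

def normalize_term (value : String) : String :=
  PySem.Str.lower (rstripDot (PySem.Str.strip value))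

-- termination measure for A's DFS: number of dict keys not yet visited
def pvMu (g : PySem.Dict String (List String)) (v : PySem.Set String) : Nat :=
  (g.keys.filter (fun k => decide (k ∉ v))).length

lemma pvFilter_lt {l : List String} {q r : String → Bool} (himp : ∀ x, q x = true → r x = true)
    {p : String} (hp : p ∈ l) (hr : r p = true) (hq : q p = false) :
    (l.filter q).length < (l.filter r).length := by
  induction l with
  | nil => cases hp
  | cons a l ih =>
    rcases List.mem_cons.1 hp with rfl | hmem
    · simp only [List.filter_cons, hr, hq]
      have : (l.filter q).length ≤ (l.filter r).length := by
        apply List.Sublist.length_le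
        exact (List.monotone_filter_right l (by intro x hx; exact himp x hx))
      simpa using Nat.lt_succ_of_le this
    · simp only [List.filter_cons]
      by_cases ha : q a = true
      · have : r a = true := himp a ha
        simp [ha, this, Nat.succ_lt_succ (ih hmem)]
      · simp only [Bool.not_eq_true] at ha
        simp only [ha]
        by_cases hra : r a = true
        · simp [hra]; exact Nat.le_of_lt (ih hmem)
        · simp only [Bool.not_eq_true] at hra; simp [hra]; exact ih hmem

lemma pvMu_add_lt {g : PySem.Dict String (List String)} {v : PySem.Set String} {p : String}
    (hk : p ∈ g.keys) (hv : p ∉ v) : pvMu g (PySem.Set.add v p) < pvMu g v := by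
  unfold pvMu
  apply pvFilter_lt (p := p) (hp := hk)
  · intro x hx
    simp only [decide_eq_true_eq] at hx ⊢
    intro hxv; exact hx (by simp [PySem.Set.mem_add, hxv])
  · simpa using hv
  · simp [PySem.Set.mem_add]

lemma pvMu_add_eq {g : PySem.Dict String (List String)} {v : PySem.Set String} {p : String}
    (hk : p ∉ g.keys) : pvMu g (PySem.Set.add v p) = pvMu g v := by
  unfold pvMu
  congr 1
  apply List.filter_congr
  intro x hx
  have hxp : x ≠ p := fun h => hk (h ▸ hx)
  simp [PySem.Set.mem_add, hxp]

lemma pvGetD_nil_of_not_key {g : PySem.Dict String (List String)} {p : String}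
    (hk : p ∉ g.keys) : g.getD p [] = [] := by
  apply PySem.Dict.getD_of_not_contains
  rw [← Bool.not_eq_true, PySem.Dict.contains_iff_mem_keys]
  exact hk

-- get_all_ancestors: the loop over graph.get(term, set()) with the recursive call
-- (on visited.copy(), functional so automatic) inlined for termination
def gaaFold (g : PySem.Dict String (List String)) (ps : List String)
    (visited acc : PySem.Set String) : PySem.Set String :=
  match ps with
  | [] => acc
  | p :: rest =>
    let sub := if p ∈ visited then (PySem.Set.empty : PySem.Set String)
               else gaaFold g (g.getD p []) (PySem.Set.add visited p) PySem.Set.empty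
    gaaFold g rest visited (PySem.Set.union (PySem.Set.add acc p) sub)
termination_by (pvMu g visited, ps.length)
decreasing_by
  · by_cases hk : p ∈ g.keys
    · exact Prod.Lex.left _ _ (pvMu_add_lt hk (by assumption))
    · rw [pvGetD_nil_of_not_key hk, pvMu_add_eq hk]
      exact Prod.Lex.right _ (by simp)
  · exact Prod.Lex.right _ (by simp)

def get_all_ancestors (g : PySem.Dict String (List String)) (term : String)
    (visited : PySem.Set String) : PySem.Set String :=
  if term ∈ visited then PySem.Set.empty
  else gaaFold g (g.getD term []) (PySem.Set.add visited term) PySem.Set.empty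

-- the loop body of build_ancestors_dict
def ancestorsA (g : PySem.Dict String (List String)) (norm : String) : PySem.Set String :=
  let direct := PySem.Set.ofList (g.getD norm [])
  let anc0 := PySem.Set.update (PySem.Set.add PySem.Set.empty norm) direct
  let anc := direct.foldl (fun a p => PySem.Set.union a (get_all_ancestors g p PySem.Set.empty)) anc0
  PySem.Set.add anc norm

def stepA (g : PySem.Dict String (List String)) (d : PySem.Dict String (List String))
    (term : String) : PySem.Dict String (List String) :=
  let norm := normalize_term term
  if norm = "" then d
  else d.insert norm (PySem.List.sorted (ancestorsA g norm) (fun x => x) false)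

def build_ancestors_dict (graph : List (String × List String)) : List (String × List String) :=
  let g := PySem.Dict.ofList graph
  (g.keys.foldl (stepA g) PySem.Dict.empty).items

-- ===== PORT B =====
-- pool of all possible frontier elements (every parent occurring in a value of g);
-- its length is a fuel bound making the Python 'while frontier:' loop total
def pvUniverse (g : PySem.Dict String (List String)) : List String := g.values.flatten

-- the while loop: seen |= frontier; frontier = {q for p in frontier for q in g.get(p,())} - seen
def bfsB (g : PySem.Dict String (List String)) :
    Nat → PySem.Set String → PySem.Set String → PySem.Set String
  | 0, seen, _ => seen
  | fuel + 1, seen, frontier =>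
    if frontier = [] then seen
    else
      let seen' := PySem.Set.union seen frontier
      bfsB g fuel seen'
        (PySem.Set.diff (PySem.Set.ofList (frontier.flatMap (fun p => g.getD p []))) seen')

-- closure(start): run the BFS from start's parents, then seen.add(start)
def closureB (g : PySem.Dict String (List String)) (start : String) : PySem.Set String :=
  PySem.Set.add
    (bfsB g (pvUniverse g).length PySem.Set.empty (PySem.Set.ofList (g.getD start [])))
    start

-- one entry of the dict comprehension (None = filtered out by 'if n')
def entryB (g : PySem.Dict String (List String)) (t : String) : Option (String × List String) :=
  let norm := normalize_term t
  if norm = "" then none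
  else some (norm, PySem.List.sorted (closureB g norm) (fun x => x) false)

def build_ancestors_dict_alt (graph : List (String × List String)) : List (String × List String) :=
  let g := PySem.Dict.ofList graph
  (PySem.Dict.ofList (g.keys.filterMap (entryB g))).items

-- ===== PRECONDITION & SPEC =====
def Spec_build_ancestors_dict (graph : List (String × List String)) (out : List (String × List String)) : Prop := out = build_ancestors_dict_alt graph
instance (graph : List (String × List String)) (out : List (String × List String)) : Decidable (Spec_build_ancestors_dict graph out) := by unfold Spec_build_ancestors_dict; infer_instance

-- ===== CLAIM (what is proved, stated in full; the proofs are below) =====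
def Claim_equal_build_ancestors_dict : Prop := ∀ (graph : List (String × List String)), Dom_build_ancestors_dict graph → Spec_build_ancestors_dict graph (build_ancestors_dict graph)

-- ===== LEMMAS AND PROOFS =====

-- reachability along parent edges
def Reach (g : PySem.Dict String (List String)) (s u : String) : Prop :=
  Relation.ReflTransGen (fun a b => b ∈ g.getD a []) s u

lemma gaaFold_nil (g : PySem.Dict String (List String)) (v acc : PySem.Set String) :
    gaaFold g [] v acc = acc := by
  rw [gaaFold]

lemma gaaFold_cons (g : PySem.Dict String (List String)) (p : String) (rest : List String)
    (v acc : PySem.Set String) :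
    gaaFold g (p :: rest) v acc
      = gaaFold g rest v (PySem.Set.union (PySem.Set.add acc p) (get_all_ancestors g p v)) := by
  rw [gaaFold, get_all_ancestors]

lemma mem_gaaFold {g : PySem.Dict String (List String)} (ps : List String)
    (v acc : PySem.Set String) (u : String) :
    u ∈ gaaFold g ps v acc ↔ u ∈ acc ∨ ∃ p ∈ ps, (u = p ∨ u ∈ get_all_ancestors g p v) := by
  induction ps generalizing acc with
  | nil => simp [gaaFold_nil]
  | cons p rest ih =>
    rw [gaaFold_cons, ih]
    simp only [PySem.Set.mem_union, PySem.Set.mem_add, List.mem_cons]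
    constructor
    · rintro (((h | h) | h) | ⟨q, hq, hc⟩)
      · exact Or.inl h
      · exact Or.inr ⟨p, Or.inl rfl, Or.inl h⟩
      · exact Or.inr ⟨p, Or.inl rfl, Or.inr h⟩
      · exact Or.inr ⟨q, Or.inr hq, hc⟩
    · rintro (h | ⟨q, rfl | hq, hc⟩)
      · exact Or.inl (Or.inl (Or.inl h))
      · rcases hc with h | h
        · exact Or.inl (Or.inl (Or.inr h))
        · exact Or.inl (Or.inr h)
      · exact Or.inr ⟨q, hq, hc⟩

lemma mem_gaa {g : PySem.Dict String (List String)} {v : PySem.Set String} {t : String}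
    (ht : t ∉ v) (u : String) :
    u ∈ get_all_ancestors g t v
      ↔ ∃ p ∈ g.getD t [], (u = p ∨ u ∈ get_all_ancestors g p (PySem.Set.add v t)) := by
  rw [get_all_ancestors, if_neg ht, mem_gaaFold]
  simp [PySem.Set.empty]

lemma gaa_sound {g : PySem.Dict String (List String)} :
    ∀ n (v : PySem.Set String) (t u : String), pvMu g v = n →
      u ∈ get_all_ancestors g t v → ∃ p ∈ g.getD t [], Reach g p u := by
  intro n
  induction n using Nat.strong_induction_on with
  | _ n ih =>
    intro v t u hmu hu
    by_cases ht : t ∈ v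
    · rw [get_all_ancestors, if_pos ht] at hu; simp [PySem.Set.empty] at hu
    · rw [mem_gaa ht] at hu
      obtain ⟨p, hp, hcase⟩ := hu
      rcases hcase with rfl | hrec
      · exact ⟨_, hp, Relation.ReflTransGen.refl⟩
      · have htk : t ∈ g.keys := by
          by_contra hk
          rw [pvGetD_nil_of_not_key hk] at hp; cases hp
        have hlt : pvMu g (PySem.Set.add v t) < n := hmu ▸ pvMu_add_lt htk ht
        obtain ⟨q, hq, hr⟩ := ih _ hlt _ p u rfl hrec
        exact ⟨p, hp, Relation.ReflTransGen.head hq hr⟩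

-- length-indexed visited-avoiding paths (non-final nodes outside v)
inductive AvN (g : PySem.Dict String (List String)) :
    Nat → PySem.Set String → String → String → Prop where
  | single {v : PySem.Set String} {t u : String}
      (hv : t ∉ v) (hu : u ∈ g.getD t []) : AvN g 1 v t u
  | cons {n : Nat} {v : PySem.Set String} {t p u : String}
      (hv : t ∉ v) (hp : p ∈ g.getD t []) (h : AvN g n v p u) : AvN g (n + 1) v t u

lemma avn_split {g : PySem.Dict String (List String)} {n : Nat} {v : PySem.Set String}
    {p u : String} (h : AvN g n v p u) (t : String) :
    AvN g n (PySem.Set.add v t) p u ∨ ∃ m ≤ n, AvN g m v t u := by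
  induction h with
  | @single v' p' u' hv hu =>
    by_cases hpt : p' = t
    · exact Or.inr ⟨1, le_refl 1, hpt ▸ AvN.single hv hu⟩
    · exact Or.inl (AvN.single (by simp [PySem.Set.mem_add, hv, hpt]) hu)
  | @cons m v' p' q u' hv hq hsub ih =>
    by_cases hpt : p' = t
    · exact Or.inr ⟨m + 1, le_refl _, hpt ▸ AvN.cons hv hq hsub⟩
    · rcases ih with h' | ⟨k, hk, hav⟩
      · exact Or.inl (AvN.cons (by simp [PySem.Set.mem_add, hv, hpt]) hq h')
      · exact Or.inr ⟨k, Nat.le_succ_of_le hk, hav⟩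

lemma gaa_complete {g : PySem.Dict String (List String)} :
    ∀ n (v : PySem.Set String) (t u : String), AvN g n v t u →
      u ∈ get_all_ancestors g t v := by
  intro n
  induction n using Nat.strong_induction_on with
  | _ n ih =>
    intro v t u h
    cases h with
    | single hv hu =>
      rw [mem_gaa hv]
      exact ⟨u, hu, Or.inl rfl⟩
    | @cons m _ _ p _ hv hp hsub =>
      rcases avn_split hsub t with h' | ⟨k, hk, hav⟩
      · rw [mem_gaa hv]
        exact ⟨p, hp, Or.inr (ih m (Nat.lt_succ_self m) _ p u h')⟩
      · exact ih k (Nat.lt_succ_of_le hk) v t u hav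

lemma reach_to_avn {g : PySem.Dict String (List String)} {s u : String}
    (h : Reach g s u) : ∀ t, s ∈ g.getD t [] → ∃ n, AvN g n PySem.Set.empty t u := by
  induction h using Relation.ReflTransGen.head_induction_on with
  | refl => exact fun t ht => ⟨1, AvN.single (by simp [PySem.Set.empty]) ht⟩
  | head hab _ ih =>
    intro t ht
    obtain ⟨n, hn⟩ := ih _ hab
    exact ⟨n + 1, AvN.cons (by simp [PySem.Set.empty]) ht hn⟩

lemma mem_foldl_union {g : PySem.Dict String (List String)} (l : List String)
    (a0 : PySem.Set String) (u : String) :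
    u ∈ l.foldl (fun a p => PySem.Set.union a (get_all_ancestors g p PySem.Set.empty)) a0
      ↔ u ∈ a0 ∨ ∃ p ∈ l, u ∈ get_all_ancestors g p PySem.Set.empty := by
  induction l generalizing a0 with
  | nil => simp
  | cons p rest ih =>
    simp only [List.foldl_cons, ih, PySem.Set.mem_union, List.mem_cons]
    constructor
    · rintro ((h | h) | ⟨q, hq, hc⟩)
      · exact Or.inl h
      · exact Or.inr ⟨p, Or.inl rfl, h⟩
      · exact Or.inr ⟨q, Or.inr hq, hc⟩
    · rintro (h | ⟨q, rfl | hq, hc⟩)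
      · exact Or.inl (Or.inl h)
      · exact Or.inl (Or.inr hc)
      · exact Or.inr ⟨q, hq, hc⟩

lemma mem_ancestorsA {g : PySem.Dict String (List String)} (norm u : String) :
    u ∈ ancestorsA g norm ↔ u = norm ∨ ∃ p ∈ g.getD norm [], Reach g p u := by
  unfold ancestorsA
  simp only [PySem.Set.mem_add, mem_foldl_union, PySem.Set.mem_update, PySem.Set.mem_ofList]
  constructor
  · rintro ((((h | h) | h) | ⟨p, hp, hu⟩) | rfl)
    · simp [PySem.Set.empty] at h
    · exact Or.inl h
    · exact Or.inr ⟨u, h, Relation.ReflTransGen.refl⟩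
    · obtain ⟨q, hq, hr⟩ := gaa_sound (pvMu g PySem.Set.empty) _ _ _ rfl hu
      exact Or.inr ⟨p, hp, Relation.ReflTransGen.head hq hr⟩
    · exact Or.inl rfl
  · rintro (rfl | ⟨p, hp, hr⟩)
    · exact Or.inr rfl
    · rcases Relation.ReflTransGen.cases_head hr with rfl | ⟨q, hq, hr'⟩
      · exact Or.inl (Or.inl (Or.inr hp))
      · obtain ⟨n, hn⟩ := reach_to_avn hr' p hq
        exact Or.inl (Or.inr ⟨p, hp, gaa_complete n _ _ _ hn⟩)

-- B side: edge targets live in pvUniverse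
lemma mem_universe_of_mem_getD {g : PySem.Dict String (List String)} {p y : String}
    (hy : y ∈ g.getD p []) : y ∈ pvUniverse g := by
  rcases h : g.get? p with _ | l
  · rw [PySem.Dict.getD_of_get?_eq_none g [] h] at hy; cases hy
  · rw [PySem.Dict.getD_of_get?_eq_some g [] h] at hy
    have : (p, l) ∈ g.items := PySem.Dict.mem_items_of_get?_eq_some g h
    exact List.mem_flatten.2 ⟨l, List.mem_map.2 ⟨(p, l), this, rfl⟩, hy⟩

-- progress measure for the BFS: distinct universe elements not yet seen
def pvMuU (g : PySem.Dict String (List String)) (seen : PySem.Set String) : Nat :=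
  ((PySem.Set.ofList (pvUniverse g)).filter (fun k => decide (k ∉ seen))).length

lemma pvMuU_lt {g : PySem.Dict String (List String)} {seen frontier : PySem.Set String}
    (hne : frontier ≠ [])
    (hd : ∀ x ∈ frontier, x ∉ seen)
    (hU : ∀ x ∈ frontier, x ∈ pvUniverse g) :
    pvMuU g (PySem.Set.union seen frontier) < pvMuU g seen := by
  obtain ⟨p, hp⟩ := List.exists_mem_of_ne_nil frontier hne
  unfold pvMuU
  apply pvFilter_lt (p := p)
  · intro x hx
    simp only [decide_eq_true_eq, PySem.Set.mem_union] at hx ⊢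
    intro hxs; exact hx (Or.inl hxs)
  · exact (PySem.Set.mem_ofList _ _).2 (hU p hp)
  · simpa using hd p hp
  · simp [PySem.Set.mem_union, hp]

-- closure invariant for the BFS
def pvInv (g : PySem.Dict String (List String)) (seen frontier : PySem.Set String) : Prop :=
  ∀ x ∈ seen, ∀ y ∈ g.getD x [], y ∈ seen ∨ y ∈ frontier

lemma reach_in_seen {g : PySem.Dict String (List String)} {seen frontier : PySem.Set String}
    (hinv : pvInv g seen frontier) {x u : String}
    (h : Reach g x u) (hx : x ∈ seen) : u ∈ seen ∨ ∃ s ∈ frontier, Reach g s u := by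
  induction h using Relation.ReflTransGen.head_induction_on with
  | refl => exact Or.inl hx
  | @head a c hac hcu ih =>
    rcases hinv a hx c hac with hc | hc
    · exact ih hc
    · exact Or.inr ⟨c, hc, hcu⟩

lemma mem_bfsB {g : PySem.Dict String (List String)} :
    ∀ (fuel : Nat) (seen frontier : PySem.Set String),
      pvInv g seen frontier →
      (∀ x ∈ frontier, x ∉ seen) →
      (∀ x ∈ frontier, x ∈ pvUniverse g) →
      pvMuU g seen ≤ fuel →
      ∀ u, (u ∈ bfsB g fuel seen frontier ↔ u ∈ seen ∨ ∃ s ∈ frontier, Reach g s u) := by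
  intro fuel
  induction fuel with
  | zero =>
    intro seen frontier hinv hd hU hmu u
    have hfe : frontier = [] := by
      rcases frontier with _ | ⟨x, rest⟩
      · rfl
      · exfalso
        have hx : x ∈ (PySem.Set.ofList (pvUniverse g)).filter (fun k => decide (k ∉ seen)) :=
          List.mem_filter.2 ⟨(PySem.Set.mem_ofList _ _).2 (hU x (by simp)), by
            simpa using hd x (by simp)⟩
        have : 0 < pvMuU g seen := by
          unfold pvMuU
          exact List.length_pos_iff.2 (List.ne_nil_of_mem hx)
        omega
    subst hfe
    simp [bfsB]
  | succ fuel ih =>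
    intro seen frontier hinv hd hU hmu u
    by_cases hfe : frontier = []
    · subst hfe; simp [bfsB]
    · rw [bfsB, if_neg hfe]
      have hinv' : pvInv g (PySem.Set.union seen frontier)
          (PySem.Set.diff (PySem.Set.ofList (frontier.flatMap (fun p => g.getD p [])))
            (PySem.Set.union seen frontier)) := by
        intro x hx y hy
        rcases (PySem.Set.mem_union _ _ _).1 hx with hxs | hxf
        · rcases hinv x hxs y hy with h | h
          · exact Or.inl ((PySem.Set.mem_union _ _ _).2 (Or.inl h))
          · exact Or.inl ((PySem.Set.mem_union _ _ _).2 (Or.inr h))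
        · by_cases hys : y ∈ PySem.Set.union seen frontier
          · exact Or.inl hys
          · refine Or.inr ((PySem.Set.mem_diff _ _ _).2 ⟨?_, hys⟩)
            exact (PySem.Set.mem_ofList _ _).2 (List.mem_flatMap.2 ⟨x, hxf, hy⟩)
      have hd' : ∀ x ∈ PySem.Set.diff (PySem.Set.ofList (frontier.flatMap (fun p => g.getD p [])))
          (PySem.Set.union seen frontier), x ∉ PySem.Set.union seen frontier := by
        intro x hx
        exact ((PySem.Set.mem_diff _ _ _).1 hx).2
      have hU' : ∀ x ∈ PySem.Set.diff (PySem.Set.ofList (frontier.flatMap (fun p => g.getD p [])))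
          (PySem.Set.union seen frontier), x ∈ pvUniverse g := by
        intro x hx
        obtain ⟨p, _, hp⟩ := List.mem_flatMap.1 ((PySem.Set.mem_ofList _ _).1
          ((PySem.Set.mem_diff _ _ _).1 hx).1)
        exact mem_universe_of_mem_getD hp
      have hmu' : pvMuU g (PySem.Set.union seen frontier) ≤ fuel := by
        have := pvMuU_lt hfe hd hU
        omega
      rw [ih _ _ hinv' hd' hU' hmu' u]
      constructor
      · rintro (h | ⟨s, hs, hr⟩)
        · rcases (PySem.Set.mem_union _ _ _).1 h with h | h
          · exact Or.inl h
          · exact Or.inr ⟨u, h, Relation.ReflTransGen.refl⟩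
        · obtain ⟨p, hpf, hsp⟩ := List.mem_flatMap.1 ((PySem.Set.mem_ofList _ _).1
            ((PySem.Set.mem_diff _ _ _).1 hs).1)
          exact Or.inr ⟨p, hpf, Relation.ReflTransGen.head hsp hr⟩
      · rintro (h | ⟨s, hs, hr⟩)
        · exact Or.inl ((PySem.Set.mem_union _ _ _).2 (Or.inl h))
        · exact reach_in_seen hinv' hr ((PySem.Set.mem_union _ _ _).2 (Or.inr hs))

lemma mem_closureB {g : PySem.Dict String (List String)} (norm u : String) :
    u ∈ closureB g norm ↔ u = norm ∨ ∃ p ∈ g.getD norm [], Reach g p u := by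
  unfold closureB
  rw [PySem.Set.mem_add,
    mem_bfsB _ _ _
      (by intro x hx; simp [PySem.Set.empty] at hx)
      (by intro x _; simp [PySem.Set.empty])
      (by intro x hx; exact mem_universe_of_mem_getD ((PySem.Set.mem_ofList _ _).1 hx))
      (le_trans (List.length_filter_le _ _) (PySem.Set.length_ofList_le _))]
  simp only [PySem.Set.empty, List.not_mem_nil, false_or, PySem.Set.mem_ofList]
  exact Or.comm

-- Nodup facts (both sides are built with PySem.Set operations)
lemma nodup_foldl_union (g : PySem.Dict String (List String)) (l : List String) :
    ∀ a0 : PySem.Set String, a0.Nodup →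
      (l.foldl (fun a p => PySem.Set.union a (get_all_ancestors g p PySem.Set.empty)) a0).Nodup := by
  induction l with
  | nil => intro a0 h; exact h
  | cons p rest ih =>
    intro a0 h
    exact ih _ (PySem.Set.nodup_union _ _ h)

lemma nodup_ancestorsA (g : PySem.Dict String (List String)) (norm : String) :
    (ancestorsA g norm).Nodup := by
  unfold ancestorsA
  exact PySem.Set.nodup_add _ _
    (nodup_foldl_union g _ _ (PySem.Set.nodup_update _ _ (PySem.Set.nodup_add _ _ List.nodup_nil)))

lemma nodup_bfsB {g : PySem.Dict String (List String)} :
    ∀ (fuel : Nat) (seen frontier : PySem.Set String), seen.Nodup →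
      (bfsB g fuel seen frontier).Nodup := by
  intro fuel
  induction fuel with
  | zero => intro seen frontier h; simpa [bfsB] using h
  | succ fuel ih =>
    intro seen frontier h
    by_cases hfe : frontier = []
    · subst hfe; simpa [bfsB] using h
    · rw [bfsB, if_neg hfe]
      exact ih _ _ (PySem.Set.nodup_union _ _ h)

lemma nodup_closureB (g : PySem.Dict String (List String)) (norm : String) :
    (closureB g norm).Nodup := by
  unfold closureB
  exact PySem.Set.nodup_add _ _ (nodup_bfsB _ _ _ List.nodup_nil)

lemma sorted_eq (g : PySem.Dict String (List String)) (norm : String) :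
    PySem.List.sorted (ancestorsA g norm) (fun x => x) false
      = PySem.List.sorted (closureB g norm) (fun x => x) false := by
  apply PySem.List.sorted_eq_sorted_of_perm _ _ _ (fun a b hab => hab)
  apply (List.perm_ext_iff_of_nodup (nodup_ancestorsA g _) (nodup_closureB g _)).2
  intro u
  rw [mem_ancestorsA, mem_closureB]

-- A's insert-or-skip loop equals updating with the filtered comprehension list
lemma foldl_stepA_eq_update (g : PySem.Dict String (List String)) :
    ∀ (l : List String) (d : PySem.Dict String (List String)),
      l.foldl (stepA g) d = d.update (l.filterMap (entryB g)) := by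
  intro l
  induction l with
  | nil => intro d; rfl
  | cons t rest ih =>
    intro d
    rw [List.foldl_cons, List.filterMap_cons, ih]
    by_cases h : normalize_term t = ""
    · rw [show entryB g t = none by simp [entryB, h]]
      rw [show stepA g d t = d by simp [stepA, h]]
    · rw [show entryB g t
          = some (normalize_term t,
              PySem.List.sorted (closureB g (normalize_term t)) (fun x => x) false) by
        simp [entryB, h]]
      rw [show stepA g d t
          = d.insert (normalize_term t)
              (PySem.List.sorted (closureB g (normalize_term t)) (fun x => x) false) by
        simp [stepA, h, sorted_eq]]
      rfl

-- ===== VERDICT (by name: the statement is the Claim_ definition above) =====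
theorem build_ancestors_dict_spec : Claim_equal_build_ancestors_dict := by
  intro graph _
  unfold Spec_build_ancestors_dict build_ancestors_dict build_ancestors_dict_alt
  show (List.foldl (stepA (PySem.Dict.ofList graph)) PySem.Dict.empty
          (PySem.Dict.ofList graph).keys).items
      = (PySem.Dict.ofList (List.filterMap (entryB (PySem.Dict.ofList graph))
          (PySem.Dict.ofList graph).keys)).items
  rw [foldl_stepA_eq_update]
  rfl
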